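-- pv_equiv track=rewrite | github.com/homebrew9/leetcode_solutions | algorithms/medium/circular_permutation_in_binary_representation.py | circularPermutation_1
-- ===== SOURCE A (Python) =====
-- from typing import List
--
-- def circularPermutation_1(n: int, start: int) -> List[int]:
--     # How to generate Gray codes using recursion?
--     # 1) Level 1: Start with ['0', '1']
--     # 2) Level 2: Prefix all elements with 0. Prefix all reversed elements with 1. Append.
--     # 3) Repeat 2) for each subsequent level.
--     # Note that at level i, len(arr) = 2^i, where i >= 1
--     #
--     def gray(i):
--         if i == 1:
--             return ['0', '1']
--         arr = gray(i - 1)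
--         return ['0'+x for x in arr] + ['1'+x for x in arr[::-1]]
--     res = gray(n)
--     res = [int(x, 2) for x in res]
--     ind = res.index(start)
--     return res[ind:] + res[:ind]
-- ===== SOURCE B (Python) =====
-- from typing import List
--
-- def circularPermutation_1(n: int, start: int) -> List[int]:
--     # Gray code of i is i ^ (i >> 1); build all 2^n codes directly as integers,
--     # then rotate the sequence to begin at start.
--     size = 1 << n
--     res = [i ^ (i >> 1) for i in range(size)]
--     ind = res.index(start)
--     return res[ind:] + res[:ind]
-- ===== Notes on version B (the rewrite author's own statement) =====
-- stated objective: faster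
-- what changed: Replaces the recursive reflect-and-prefix construction over binary strings (plus a base-2 reparse of every string) with a single pass computing each Gray code directly as the integer i ^ (i >> 1).
import Mathlib
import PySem

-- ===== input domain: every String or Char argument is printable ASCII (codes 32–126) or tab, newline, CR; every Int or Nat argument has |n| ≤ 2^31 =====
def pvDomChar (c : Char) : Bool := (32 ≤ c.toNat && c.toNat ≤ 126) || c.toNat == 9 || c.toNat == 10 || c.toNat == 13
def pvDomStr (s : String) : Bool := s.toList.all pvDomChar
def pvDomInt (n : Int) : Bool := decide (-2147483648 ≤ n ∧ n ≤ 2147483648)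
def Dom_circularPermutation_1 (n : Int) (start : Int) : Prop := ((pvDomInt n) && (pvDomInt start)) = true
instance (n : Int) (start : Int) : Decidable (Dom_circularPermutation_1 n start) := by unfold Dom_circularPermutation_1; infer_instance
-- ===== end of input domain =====

-- B replaces the recursive reflect-and-prefix construction over binary strings with one
-- pass computing each Gray code directly as the integer i ^ (i >> 1) (objective: faster).


-- ===== PORT A =====
-- gray(i): A's inner recursion, indexed by i-1 : Nat (grayA k = gray (k+1); Python's gray
-- diverges for i ≤ 0, which Pre_ excludes). Python's binary strings are kept as List Char;
-- '0'+x prepends a char; arr[::-1] is reverse (PySem.List.slice?_none_none_neg_one).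
def grayA : Nat → List (List Char)
  | 0 => [['0'], ['1']]
  | k+1 =>
      let arr := grayA k
      arr.map (fun x => '0' :: x) ++ arr.reverse.map (fun x => '1' :: x)

-- int(x, 2): ported by hand as the base-2 digit fold; exact for the strings gray produces
-- (pure '0'/'1' digit strings: no sign, whitespace, underscore or 0b-prefix ever occurs).
def binVal (x : List Char) : Int :=
  x.foldl (fun a c => 2 * a + (if c = '1' then 1 else 0)) 0

def circularPermutation_1 (n : Int) (start : Int) : List Int :=
  let res : List Int := (grayA (n - 1).toNat).map binVal
  match PySem.List.index? res start with
  | some ind => PySem.List.slice res (some (ind : Int)) none ++ PySem.List.slice res none (some (ind : Int))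
  | none => []   -- res.index(start) raises ValueError: excluded by Pre_

-- ===== PORT B =====
def circularPermutation_1_alt (n : Int) (start : Int) : List Int :=
  let size : Int := 1 <<< n.toNat   -- Python 1 << n (n < 0 raises: excluded by Pre_)
  let res : List Int := (PySem.List.pyRange 0 size 1).map (fun i => PySem.Int.bxor i (i >>> (1 : Nat)))
  match PySem.List.index? res start with
  | some ind => PySem.List.slice res (some (ind : Int)) none ++ PySem.List.slice res none (some (ind : Int))
  | none => []   -- res.index(start) raises ValueError: excluded by Pre_

-- ===== PRECONDITION & SPEC =====
-- Exactly the inputs on which A returns: gray(n) needs n ≥ 1 (it recurses forever otherwise)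
-- and res.index(start) needs start to be an n-bit value.
def Pre_circularPermutation_1 (n : Int) (start : Int) : Prop :=
  1 ≤ n ∧ 0 ≤ start ∧ start < 2 ^ n.toNat
instance (n : Int) (start : Int) : Decidable (Pre_circularPermutation_1 n start) := by unfold Pre_circularPermutation_1; infer_instance
def pvWitness_circularPermutation_1 : Int × Int := (3, 5)

def Spec_circularPermutation_1 (n : Int) (start : Int) (out : List Int) : Prop := out = circularPermutation_1_alt n start
instance (n : Int) (start : Int) (out : List Int) : Decidable (Spec_circularPermutation_1 n start out) := by unfold Spec_circularPermutation_1; infer_instance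

-- ===== CLAIM (what is proved, stated in full; the proofs are below) =====
def Claim_equal_circularPermutation_1 : Prop := ∀ (n : Int) (start : Int), Dom_circularPermutation_1 n start → Pre_circularPermutation_1 n start → Spec_circularPermutation_1 n start (circularPermutation_1 n start)

-- ===== LEMMAS AND PROOFS =====

-- the Gray code of i as an integer, B's formula on the Nat side
def gv (i : Nat) : Nat := i ^^^ (i >>> 1)

theorem length_mem_grayA (k : Nat) (x : List Char) (hx : x ∈ grayA k) : x.length = k + 1 := by
  induction k generalizing x with
  | zero =>
      simp only [grayA, List.mem_cons, List.not_mem_nil, or_false] at hx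
      rcases hx with rfl | rfl <;> rfl
  | succ k ih =>
      simp only [grayA, List.mem_append, List.mem_map, List.mem_reverse] at hx
      rcases hx with ⟨y, hy, rfl⟩ | ⟨y, hy, rfl⟩ <;> simp [ih y hy]

theorem binval_shift (x : List Char) (a : Int) :
    x.foldl (fun a c => 2 * a + (if c = '1' then 1 else 0)) a
      = a * 2 ^ x.length + binVal x := by
  induction x generalizing a with
  | nil => simp [binVal]
  | cons c x ih =>
      simp only [List.foldl_cons, List.length_cons, binVal]
      rw [ih (2 * a + _), ih (2 * 0 + _)]
      ring

theorem two_pow_add_eq_xor {t x : Nat} (h : x < 2 ^ t) : 2 ^ t + x = 2 ^ t ^^^ x := by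
  apply Nat.eq_of_testBit_eq
  intro i
  rcases lt_trichotomy i t with hi | rfl | hi
  · rw [Nat.testBit_two_pow_add_gt hi, Nat.testBit_xor, Nat.testBit_two_pow]
    simp [Nat.ne_of_gt hi]
  · rw [Nat.testBit_two_pow_add_eq, Nat.testBit_xor, Nat.testBit_two_pow]
    simp [Nat.testBit_lt_two_pow h]
  · have h1 : 2 ^ t + x < 2 ^ i := by
      calc 2 ^ t + x < 2 ^ t + 2 ^ t := by omega
      _ = 2 ^ (t + 1) := by ring
      _ ≤ 2 ^ i := Nat.pow_le_pow_right (by norm_num) hi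
    rw [Nat.testBit_lt_two_pow h1, Nat.testBit_xor, Nat.testBit_two_pow]
    have : x < 2 ^ i := lt_of_lt_of_le h (Nat.pow_le_pow_right (by norm_num) (le_of_lt hi))
    simp [Nat.testBit_lt_two_pow this, Nat.ne_of_lt hi]
theorem two_pow_sub_one_sub_eq_xor {t j : Nat} (h : j < 2 ^ t) :
    2 ^ t - 1 - j = (2 ^ t - 1) ^^^ j := by
  apply Nat.eq_of_testBit_eq
  intro i
  have hj : 2 ^ t - 1 - j = 2 ^ t - (j + 1) := by omega
  rw [hj, Nat.testBit_two_pow_sub_succ h, Nat.testBit_xor, Nat.testBit_two_pow_sub_one]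
  by_cases hi : i < t
  · simp [hi]
  · have : j < 2 ^ i := lt_of_lt_of_le h (Nat.pow_le_pow_right (by norm_num) (by omega))
    simp [hi, Nat.testBit_lt_two_pow this]

theorem gv_lt {t x : Nat} (h : x < 2 ^ t) : gv x < 2 ^ t := by
  refine Nat.xor_lt_two_pow h (lt_of_le_of_lt ?_ h)
  simpa [Nat.shiftRight_one] using Nat.div_le_self x 2

theorem pow_sub_one_xor (m : Nat) : (2 ^ (m + 1) - 1) ^^^ (2 ^ m - 1) = 2 ^ m := by
  apply Nat.eq_of_testBit_eq
  intro i
  rw [Nat.testBit_xor, Nat.testBit_two_pow_sub_one, Nat.testBit_two_pow_sub_one, Nat.testBit_two_pow]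
  rcases lt_trichotomy i m with hi | rfl | hi
  · simp [hi, Nat.ne_of_gt hi]; omega
  · simp
  · simp [Nat.ne_of_lt hi]; omega

theorem gv_reflect (m j : Nat) (h : j < 2 ^ (m + 1)) :
    gv (2 ^ (m + 1) + j) = 2 ^ (m + 1) + gv (2 ^ (m + 1) - 1 - j) := by
  have hpos : 0 < 2 ^ (m + 1) := by positivity
  have harg : 2 ^ (m + 1) - 1 - j < 2 ^ (m + 1) := by omega
  rw [two_pow_add_eq_xor h, two_pow_add_eq_xor (gv_lt harg)]
  unfold gv
  rw [two_pow_sub_one_sub_eq_xor h]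
  have hs1 : (2 ^ (m + 1) : Nat) >>> 1 = 2 ^ m := by
    rw [Nat.shiftRight_one, pow_succ]; omega
  have hs2 : ((2 ^ (m + 1) - 1 : Nat)) >>> 1 = 2 ^ m - 1 := by
    rw [Nat.shiftRight_one]
    have : (2:Nat) ^ (m+1) = 2 ^ m * 2 := pow_succ 2 m
    omega
  rw [Nat.shiftRight_xor_distrib, Nat.shiftRight_xor_distrib, hs1, hs2]
  have key := pow_sub_one_xor m
  generalize hr : j >>> 1 = r at key ⊢
  generalize hC : (2:Nat) ^ (m+1) - 1 = C at key ⊢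
  generalize hD : (2:Nat) ^ m - 1 = D at key ⊢
  generalize hA : (2:Nat) ^ (m+1) = A at key ⊢
  generalize hB : (2:Nat) ^ m = B at key ⊢
  rw [← key]
  simp [Nat.xor_comm, Nat.xor_left_comm]

theorem grayVals (k : Nat) :
    (grayA k).map binVal
      = (List.range (2 ^ (k + 1))).map (fun i => ((gv i : Nat) : Int)) := by
  induction k with
  | zero => decide
  | succ k ih =>
      have hlen : (grayA k).length = 2 ^ (k + 1) := by
        simpa using congrArg List.length ih
      have hih : ∀ (j : Nat) (hj : j < (grayA k).length),
          binVal ((grayA k)[j]) = ((gv j : Nat) : Int) := by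
        intro j hj
        have h1 : ((grayA k).map binVal)[j]'(by simpa using hj)
            = ((List.range (2 ^ (k + 1))).map (fun i => ((gv i : Nat) : Int)))[j]'(by
              simp [← ih]; simpa using hj) := by
          simp [ih]
        simpa using h1
      simp only [grayA, List.map_append, List.map_map]
      have h2 : (2 : Nat) ^ (k + 1 + 1) = 2 ^ (k + 1) + 2 ^ (k + 1) := by ring
      rw [h2, List.range_add, List.map_append, List.map_map]
      have hfirst : (grayA k).map (binVal ∘ fun x => '0' :: x)
          = (List.range (2 ^ (k + 1))).map (fun i => ((gv i : Nat) : Int)) := by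
        rw [← ih]
        apply List.map_congr_left
        intro x hx
        simp [Function.comp, binVal, List.foldl]
      have hsecond : (grayA k).reverse.map (binVal ∘ fun x => '1' :: x)
          = (List.range (2 ^ (k + 1))).map ((fun i => ((gv i : Nat) : Int)) ∘ fun x => 2 ^ (k + 1) + x) := by
        apply List.ext_getElem
        · simp [hlen]
        · intro i hi1 hi2
          have hiS : i < 2 ^ (k + 1) := by simpa using hi2
          have hrevlen : i < (grayA k).reverse.length := by simpa [hlen] using hiS
          simp only [List.getElem_map, List.getElem_reverse, List.getElem_range,
            Function.comp]
          have hmem : (grayA k)[(grayA k).length - 1 - i] ∈ grayA k := List.getElem_mem _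
          have hlx : ((grayA k)[(grayA k).length - 1 - i]).length = k + 1 :=
            length_mem_grayA k _ hmem
          have hb1 : binVal ('1' :: (grayA k)[(grayA k).length - 1 - i])
              = 2 ^ (k + 1) + binVal ((grayA k)[(grayA k).length - 1 - i]) := by
            show List.foldl _ _ _ = _
            rw [List.foldl_cons]
            have : (2 * (0:Int) + (if '1' = '1' then 1 else 0)) = 1 := by norm_num
            rw [this, binval_shift, hlx]
            ring
          rw [hb1, hih ((grayA k).length - 1 - i) (by omega)]
          rw [gv_reflect k i hiS]
          have : (grayA k).length - 1 - i = 2 ^ (k + 1) - 1 - i := by omega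
          rw [this]
          push_cast
          ring
      rw [hfirst, hsecond]


theorem size_eq (t : Nat) : (1 <<< t : Int) = ((2 ^ t : Nat) : Int) := by
  simp [Int.shiftLeft_eq]

theorem res_eq (n : Int) (hn : 1 ≤ n) :
    (grayA (n - 1).toNat).map binVal
      = (PySem.List.pyRange 0 (1 <<< n.toNat) 1).map (fun i => PySem.Int.bxor i (i >>> (1 : Nat))) := by
  rw [PySem.List.pyRange_one, List.map_map, size_eq]
  have h1 : (((2 ^ n.toNat : Nat) : Int) - 0).toNat = 2 ^ n.toNat := by rw [Int.sub_zero, Int.toNat_natCast]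
  have ht : n.toNat = (n - 1).toNat + 1 := by omega
  rw [h1, grayVals, ← ht]
  apply List.map_congr_left
  intro k hk
  have h : ((k : Int) >>> (1 : Nat)) = ((k >>> 1 : Nat) : Int) := by simp
  simp only [Function.comp, gv, zero_add, h, PySem.Int.bxor_natCast]

-- ===== VERDICT (by name: the statement is the Claim_ definition above) =====
theorem circularPermutation_1_spec : Claim_equal_circularPermutation_1 := by
  intro n start _ hpre
  show circularPermutation_1 n start = circularPermutation_1_alt n start
  simp only [circularPermutation_1, circularPermutation_1_alt]
  rw [res_eq n hpre.1]
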